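-- pv_equiv track=rewrite | github.com/las-tochka/discret | app.py | is_externally_stable
-- ===== SOURCE A (Python) =====
-- def is_externally_stable(graph, subset):
--     n = len(graph)
--     subset_set = set(subset)
--     for v in range(n):
--         if v not in subset_set:
--             if not any(graph[v][u] == 1 for u in subset_set):
--                 return False
--     return True
-- ===== SOURCE B (Python) =====
-- def is_externally_stable(graph, subset):
--     n = len(graph)
--     subset_set = set(subset)
--     covered = {v for u in subset_set for v in range(n) if graph[v][u] == 1}
--     return all(v in covered for v in range(n) if v not in subset_set)
-- ===== Notes on version B (the rewrite author's own statement) =====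
-- stated objective: alternative
-- what changed: B first builds the set of all vertices covered by an edge into some subset vertex in one pass over subset columns, then does a single containment pass over non-subset vertices, instead of A's per-vertex inner scan of the subset.
-- outside the precondition, e.g. on is_externally_stable([[1, 1], [1]], [1]): A returns True, B raises IndexError
import Mathlib
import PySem

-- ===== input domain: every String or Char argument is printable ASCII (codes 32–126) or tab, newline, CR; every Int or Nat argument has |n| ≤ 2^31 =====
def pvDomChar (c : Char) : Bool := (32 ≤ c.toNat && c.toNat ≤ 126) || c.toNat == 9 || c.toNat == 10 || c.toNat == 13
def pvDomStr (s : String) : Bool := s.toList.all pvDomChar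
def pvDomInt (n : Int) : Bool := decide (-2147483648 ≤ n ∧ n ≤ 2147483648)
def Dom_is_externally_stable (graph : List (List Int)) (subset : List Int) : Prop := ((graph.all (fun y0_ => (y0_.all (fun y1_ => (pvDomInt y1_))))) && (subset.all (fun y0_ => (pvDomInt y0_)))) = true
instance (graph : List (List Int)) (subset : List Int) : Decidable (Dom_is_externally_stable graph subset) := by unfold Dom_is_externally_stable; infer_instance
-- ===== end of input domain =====

-- B differs from A by building the covered-vertex set once and then doing a single
-- containment pass, instead of scanning the subset per outside vertex (objective: alternative).

-- ===== PORT A =====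
-- A: for each v in range(n) not in subset_set, fail unless some u in subset_set has graph[v][u] == 1.
-- graph[v][u] is ported with the total pyGetD form, exact under Pre_ (all accesses in range).
def is_externally_stable (graph : List (List Int)) (subset : List Int) : Bool :=
  let n : Int := graph.length
  let subset_set : PySem.Set Int := PySem.Set.ofList subset
  (PySem.List.pyRange 0 n 1).all (fun v =>
    if PySem.Set.contains subset_set v then true
    else subset_set.any (fun u => PySem.List.pyGetD (PySem.List.pyGetD graph v []) u 0 == 1))

-- ===== PORT B =====
-- B: covered = {v for u in subset_set for v in range(n) if graph[v][u] == 1};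
--    all(v in covered for v in range(n) if v not in subset_set).
def is_externally_stable_alt (graph : List (List Int)) (subset : List Int) : Bool :=
  let n : Int := graph.length
  let subset_set : PySem.Set Int := PySem.Set.ofList subset
  let covered : PySem.Set Int :=
    subset_set.foldl (fun acc u =>
      (PySem.List.pyRange 0 n 1).foldl (fun acc v =>
        if PySem.List.pyGetD (PySem.List.pyGetD graph v []) u 0 == 1
        then PySem.Set.add acc v else acc) acc)
      PySem.Set.empty
  (PySem.List.pyRange 0 n 1).all (fun v =>
    if PySem.Set.contains subset_set v then true
    else PySem.Set.contains covered v)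

-- ===== PRECONDITION & SPEC =====
-- Pre_ requires every subset element to be a valid (possibly negative, Python-style) column
-- index into every row: outside it A raises IndexError, or (on ragged graphs / thanks to
-- any()'s short-circuit over set iteration order) returns a value that depends on hash order,
-- while B raises IndexError.
def Pre_is_externally_stable (graph : List (List Int)) (subset : List Int) : Prop :=
  ∀ u ∈ subset, ∀ row ∈ graph, PySem.Raise.InRange row.length u
instance (graph : List (List Int)) (subset : List Int) : Decidable (Pre_is_externally_stable graph subset) := by unfold Pre_is_externally_stable; infer_instance

def pvWitness_is_externally_stable : List (List Int) × List Int := ([[1, 0], [0, 1]], [0])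

def Spec_is_externally_stable (graph : List (List Int)) (subset : List Int) (out : Bool) : Prop := out = is_externally_stable_alt graph subset
instance (graph : List (List Int)) (subset : List Int) (out : Bool) : Decidable (Spec_is_externally_stable graph subset out) := by unfold Spec_is_externally_stable; infer_instance

-- ===== CLAIM (what is proved, stated in full; the proofs are below) =====
def Claim_equal_is_externally_stable : Prop := ∀ (graph : List (List Int)) (subset : List Int), Dom_is_externally_stable graph subset → Pre_is_externally_stable graph subset → Spec_is_externally_stable graph subset (is_externally_stable graph subset)

-- ===== LEMMAS AND PROOFS =====

-- membership in the inner "add v if edge" fold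
theorem pv_mem_inner_fold (P : Int → Bool) (vs : List Int) (acc : PySem.Set Int) (x : Int) :
    (x ∈ vs.foldl (fun a v => if P v then PySem.Set.add a v else a) acc) ↔
      x ∈ acc ∨ (x ∈ vs ∧ P x = true) := by
  induction vs generalizing acc with
  | nil => simp
  | cons v vs ih =>
      simp only [List.foldl_cons, ih]
      by_cases hp : P v
      · simp [hp, PySem.Set.mem_add]
        constructor
        · rintro (⟨h | rfl⟩ | h)
          · exact Or.inl h
          · exact Or.inr ⟨Or.inl rfl, hp⟩
          · exact Or.inr ⟨Or.inr h.1, h.2⟩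
        · rintro (h | ⟨rfl | h, hx⟩)
          · exact Or.inl (Or.inl h)
          · exact Or.inl (Or.inr rfl)
          · exact Or.inr ⟨h, hx⟩
      · simp [hp]
        constructor
        · rintro (h | h)
          · exact Or.inl h
          · exact Or.inr ⟨Or.inr h.1, h.2⟩
        · rintro (h | ⟨rfl | h, hx⟩)
          · exact Or.inl h
          · exact absurd hx hp
          · exact Or.inr ⟨h, hx⟩

-- membership in the whole covered-set fold
theorem pv_mem_covered (Q : Int → Int → Bool) (us vs : List Int) (acc : PySem.Set Int) (x : Int) :
    (x ∈ us.foldl (fun a u => vs.foldl (fun a v => if Q u v then PySem.Set.add a v else a) a) acc) ↔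
      x ∈ acc ∨ ∃ u ∈ us, x ∈ vs ∧ Q u x = true := by
  induction us generalizing acc with
  | nil => simp
  | cons u us ih =>
      simp only [List.foldl_cons, ih, pv_mem_inner_fold]
      constructor
      · rintro ((h | h) | ⟨w, hw, hx⟩)
        · exact Or.inl h
        · exact Or.inr ⟨u, List.mem_cons_self .., h⟩
        · exact Or.inr ⟨w, List.mem_cons_of_mem _ hw, hx⟩
      · rintro (h | ⟨w, hw, hx⟩)
        · exact Or.inl (Or.inl h)
        · rcases List.mem_cons.mp hw with rfl | hw
          · exact Or.inl (Or.inr hx)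
          · exact Or.inr ⟨w, hw, hx⟩

-- ===== VERDICT (by name: the statement is the Claim_ definition above) =====
theorem is_externally_stable_spec : Claim_equal_is_externally_stable := by
  intro graph subset _ _
  unfold Spec_is_externally_stable is_externally_stable is_externally_stable_alt
  rw [Bool.eq_iff_iff]
  simp only [List.all_eq_true]
  refine forall_congr' fun v => forall_congr' fun hv => ?_
  by_cases hs : v ∈ subset
  · simp [PySem.Set.contains, PySem.Set.mem_ofList, hs]
  · simp only [PySem.Set.contains, List.contains_eq_mem, PySem.Set.mem_ofList, hs,
      decide_false, Bool.false_eq_true, if_false, decide_eq_true_eq, List.any_eq_true]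
    rw [pv_mem_covered]
    simp only [PySem.Set.mem_ofList, beq_iff_eq]
    constructor
    · rintro ⟨u, hu, hq⟩
      exact Or.inr ⟨u, hu, hv, hq⟩
    · rintro (h | ⟨u, hu, -, hq⟩)
      · exact absurd h (by simp [PySem.Set.empty])
      · exact ⟨u, hu, hq⟩
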